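-- pv_equiv track=rewrite | github.com/radhikaD30/DSFundamentals_Radhika | assignment_5_calories.py | highest_day_cal
-- ===== SOURCE A (Python) =====
-- def highest_day_cal(data):
--     if not data:
--         return 0, 0
--     highest_day = data[0][0]
--     highest_cal = sum(int(cal) for cal in data[0][1:])
--     for row in data:
--         total_cal = sum(int(cal) for cal in row[1:])
--         if total_cal > highest_cal:
--             highest_cal = total_cal
--             highest_day = row[0]
--     return highest_day, highest_cal
-- ===== SOURCE B (Python) =====
-- def highest_day_cal(data):
--     if not data:
--         return 0, 0
--     totals = [sum(int(c) for c in row[1:]) for row in data]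
--     m = max(totals)
--     return data[totals.index(m)][0], m
-- ===== Notes on version B (the rewrite author's own statement) =====
-- stated objective: alternative
-- what changed: Replaces the single interleaved running-max loop (seeded from row 0 and updated with strict >) by a two-pass table shape: first materialize all per-day totals in one comprehension, then select with max() and totals.index() to keep first-wins tie-breaking.
-- outside the precondition, e.g. on highest_day_cal([]): A returns (0, 0), B returns (0, 0)
import Mathlib
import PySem

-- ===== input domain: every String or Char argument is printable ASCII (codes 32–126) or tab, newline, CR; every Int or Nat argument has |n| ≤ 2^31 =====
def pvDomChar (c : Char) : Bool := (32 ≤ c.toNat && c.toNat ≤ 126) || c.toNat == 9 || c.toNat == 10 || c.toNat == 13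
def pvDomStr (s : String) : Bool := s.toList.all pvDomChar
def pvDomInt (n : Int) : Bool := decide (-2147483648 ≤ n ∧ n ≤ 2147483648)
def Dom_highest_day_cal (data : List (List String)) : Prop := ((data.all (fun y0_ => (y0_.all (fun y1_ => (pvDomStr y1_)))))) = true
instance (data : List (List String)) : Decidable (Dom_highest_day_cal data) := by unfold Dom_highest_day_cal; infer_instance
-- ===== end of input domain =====

-- B replaces A's interleaved running-max loop (seeded from row 0, strict '>') by a two-pass shape: a totals table, then max() and first index; same cost, different decomposition.


-- ===== PORT A =====
-- sum(int(cal) for cal in row[1:]); Pre_ guarantees every parse succeeds, so the getD 0 default is never taken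
def pvRowSum (row : List String) : Int :=
  ((PySem.List.slice row (some 1) none).map (fun c => (PySem.Int.ofStr? c).getD 0)).sum

def highest_day_cal (data : List (List String)) : String × Int :=
  match data with
  | [] => ("", 0)   -- Python returns (0, 0) here: not a String × Int value; excluded by Pre_
  | first :: _ =>
    let init : String × Int := ((PySem.List.pyGet? first 0).getD "", pvRowSum first)
    data.foldl (fun s row =>
      let total_cal := pvRowSum row
      if total_cal > s.2 then ((PySem.List.pyGet? row 0).getD "", total_cal) else s) init

-- ===== PORT B =====
def highest_day_cal_alt (data : List (List String)) : String × Int :=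
  match data with
  | [] => ("", 0)   -- Python returns (0, 0) here: not a String × Int value; excluded by Pre_
  | _ :: _ =>
    let totals := data.map pvRowSum
    let m := (PySem.List.max? totals (fun x => x)).getD 0
    let idx := (PySem.List.index? totals m).getD 0
    ((PySem.List.pyGet? ((PySem.List.pyGet? data ((idx : Nat) : Int)).getD []) 0).getD "", m)

-- ===== PRECONDITION & SPEC =====
-- Pre_ excludes: empty data, where A returns the int pair (0, 0) — not a value of the declared
-- String × Int result type; empty rows (A raises IndexError on data[0][0] / row[0]); and rows whose
-- tail contains a string that int() rejects (A raises ValueError).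
def Pre_highest_day_cal (data : List (List String)) : Prop :=
  data ≠ [] ∧ ∀ row ∈ data, row ≠ [] ∧ ∀ c ∈ row.tail, (PySem.Int.ofStr? c).isSome
instance (data : List (List String)) : Decidable (Pre_highest_day_cal data) := by
  unfold Pre_highest_day_cal; infer_instance

def pvWitness_highest_day_cal : List (List String) := [["Mon", "300", "40"], ["Tue", "500"]]

def Spec_highest_day_cal (data : List (List String)) (out : String × Int) : Prop := out = highest_day_cal_alt data
instance (data : List (List String)) (out : String × Int) : Decidable (Spec_highest_day_cal data out) := by unfold Spec_highest_day_cal; infer_instance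

-- ===== CLAIM (what is proved, stated in full; the proofs are below) =====
def Claim_equal_highest_day_cal : Prop := ∀ (data : List (List String)), Dom_highest_day_cal data → Pre_highest_day_cal data → Spec_highest_day_cal data (highest_day_cal data)

-- ===== LEMMAS AND PROOFS =====

-- the pair (row[0], sum of row[1:]) both programs are really about; proof-only helper
def pvKey (row : List String) : String × Int :=
  ((PySem.List.pyGet? row 0).getD "", pvRowSum row)

-- A's running max with strict '>' keeps the FIRST pair whose second attains the overall maximum.
lemma pick_eq (ps : List (String × Int)) : ∀ (a : String × Int),
    ps.foldl (fun s p => if p.2 > s.2 then p else s) a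
      = ((a :: ps).find? (fun p => p.2 == (ps.map (fun q => q.2)).foldl max a.2)).getD a := by
  induction ps with
  | nil => intro a; simp
  | cons p rest ih =>
    intro a
    simp only [List.foldl_cons, List.map_cons]
    rw [ih]
    have hmax : (rest.map (fun q => q.2)).foldl max (max a.2 p.2)
        = (rest.map (fun q => q.2)).foldl max (if p.2 > a.2 then p else a).2 := by
      congr 1
      by_cases h : p.2 > a.2 <;> simp [h] <;> omega
    have hle : max a.2 p.2 ≤ (rest.map (fun q => q.2)).foldl max (max a.2 p.2) :=
      (PySem.List.le_foldl_max _ _).1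
    set M := (rest.map (fun q => q.2)).foldl max (max a.2 p.2) with hM
    by_cases h : p.2 > a.2
    · simp only [if_pos h] at hmax ⊢
      rw [← hmax]
      have ha : ¬ (a.2 == M) = true := by simp; omega
      rw [List.find?_cons_of_neg (p := fun q : String × Int => q.2 == M) ha]
      have hatt : ∃ q ∈ p :: rest, (q.2 == M) = true := by
        rcases PySem.List.foldl_max_mem (rest.map (fun q => q.2)) (max a.2 p.2) with hc | hc
        · exact ⟨p, List.mem_cons_self, by simp; omega⟩
        · rw [List.mem_map] at hc
          obtain ⟨q, hq, hq2⟩ := hc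
          exact ⟨q, List.mem_cons_of_mem _ hq, by simp [hq2]; exact hM.symm⟩
      obtain ⟨r, hr⟩ := Option.isSome_iff_exists.mp (List.find?_isSome.2 hatt)
      simp [hr]
    · simp only [if_neg h] at hmax ⊢
      rw [← hmax]
      by_cases ha : (a.2 == M) = true
      · rw [List.find?_cons_of_pos (p := fun q : String × Int => q.2 == M) ha,
            List.find?_cons_of_pos (p := fun q : String × Int => q.2 == M) ha]
      · rw [List.find?_cons_of_neg (p := fun q : String × Int => q.2 == M) ha,
            List.find?_cons_of_neg (p := fun q : String × Int => q.2 == M) ha]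
        have hp : ¬ (p.2 == M) = true := by simp at ha ⊢; omega
        rw [List.find?_cons_of_neg (p := fun q : String × Int => q.2 == M) hp]

-- B's totals.index(m) picks the index of the first pair whose second is m.
lemma find?_map_snd (ps : List (String × Int)) : ∀ (m : Int) (k : Nat),
    PySem.List.index? (ps.map (fun q : String × Int => q.2)) m = some k →
    ps.find? (fun p => p.2 == m) = ps[k]? := by
  induction ps with
  | nil => intro m k h; simp [PySem.List.index?] at h
  | cons p rest ih =>
    intro m k h
    simp only [List.map_cons] at h
    by_cases hp : p.2 = m
    · rw [hp, PySem.List.index?_cons_self] at h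
      obtain rfl : k = 0 := by simpa using h.symm
      rw [List.find?_cons_of_pos (p := fun q : String × Int => q.2 == m) (by simp [hp])]
      simp
    · rw [PySem.List.index?_cons_of_ne _ hp] at h
      obtain ⟨k', hk', rfl⟩ := Option.map_eq_some_iff.mp h
      rw [List.find?_cons_of_neg (p := fun q : String × Int => q.2 == m) (by simp [hp])]
      simpa using ih m k' hk'

-- A folds over all of data starting from row 0's pair, so row 0's pair appears twice; harmless:
lemma find?_dup {α : Type} (p : α → Bool) (x : α) (l : List α) :
    List.find? p (x :: x :: l) = List.find? p (x :: l) := by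
  by_cases h : p x = true
  · rw [List.find?_cons_of_pos h, List.find?_cons_of_pos h]
  · rw [List.find?_cons_of_neg h, List.find?_cons_of_neg h]

lemma main_eq (r : List String) (rs : List (List String)) :
    highest_day_cal (r :: rs) = highest_day_cal_alt (r :: rs) := by
  set M : Int := (rs.map pvRowSum).foldl max (pvRowSum r) with hMdef
  have htot : (r :: rs).map pvRowSum = ((r :: rs).map pvKey).map (fun q : String × Int => q.2) := by
    simp [pvKey]
  have hmem : M ∈ (r :: rs).map pvRowSum := by
    rcases PySem.List.foldl_max_mem (rs.map pvRowSum) (pvRowSum r) with hc | hc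
    · rw [hMdef, hc]; simp
    · exact List.mem_cons_of_mem _ hc
  obtain ⟨k, hk⟩ := Option.isSome_iff_exists.mp ((PySem.List.index?_isSome_iff _ _).mpr hmem)
  obtain ⟨hklt, hkval, -⟩ := PySem.List.getElem_of_index?_eq_some hk
  have hklt' : k < (r :: rs).length := by simpa using hklt
  -- A side: the fold is the first pair attaining the maximum M
  have hA : highest_day_cal (r :: rs) = pvKey ((r :: rs)[k]'hklt') := by
    have h0 : highest_day_cal (r :: rs)
        = ((r :: rs).map pvKey).foldl (fun s p => if p.2 > s.2 then p else s) (pvKey r) := by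
      rw [List.foldl_map]; rfl
    rw [h0, pick_eq]
    have hM2 : ((((r :: rs).map pvKey).map (fun q => q.2)).foldl max (pvKey r).2) = M := by
      simp [pvKey, hMdef, Function.comp_def]
    rw [hM2]
    have : (pvKey r :: (r :: rs).map pvKey) = pvKey r :: pvKey r :: rs.map pvKey := by simp
    rw [this, find?_dup]
    have : (pvKey r :: rs.map pvKey) = (r :: rs).map pvKey := by simp
    rw [this, find?_map_snd _ M k (by rw [← htot]; exact hk)]
    rw [List.getElem?_map, List.getElem?_eq_getElem hklt']
    rfl
  -- B side: max + first index give the same pair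
  have hB : highest_day_cal_alt (r :: rs) = ((pvKey ((r :: rs)[k]'hklt')).1, M) := by
    show ((PySem.List.pyGet? ((PySem.List.pyGet? (r :: rs) ((((PySem.List.index? ((r :: rs).map pvRowSum)
        ((PySem.List.max? ((r :: rs).map pvRowSum) (fun x => x)).getD 0)).getD 0 : Nat)) : Int)).getD []) 0).getD "",
        (PySem.List.max? ((r :: rs).map pvRowSum) (fun x => x)).getD 0) = _
    have hm : ((PySem.List.max? ((r :: rs).map pvRowSum) (fun x => x)).getD 0) = M := by
      simp [PySem.List.max?_id_cons, hMdef]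
    rw [hm, hk]
    simp only [Option.getD_some, PySem.List.pyGet?_natCast,
      List.getElem?_eq_getElem hklt', Option.getD_some]
    rfl
  rw [hA, hB]
  have h2 : (pvKey ((r :: rs)[k]'hklt')).2 = M := by
    show pvRowSum ((r :: rs)[k]'hklt') = M
    rw [← hkval]
    exact (List.getElem_map pvRowSum).symm
  rw [← h2]

-- ===== VERDICT (by name: the statement is the Claim_ definition above) =====
theorem highest_day_cal_spec : Claim_equal_highest_day_cal := by
  intro data _ hpre
  unfold Spec_highest_day_cal
  match data with
  | [] => exact absurd rfl hpre.1
  | r :: rs => exact main_eq r rs
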